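-- pv_equiv track=rewrite | github.com/todd136/bank_receipt | src/bank_receipt/pymupdf_service.py | _best_digit_from_learning
-- ===== SOURCE A (Python) =====
-- from typing import Any, Dict, List, Optional, Tuple
--
-- def _best_digit_from_learning(entry: Any) -> str:
--     if not isinstance(entry, dict):
--         return ""
--     pairs = [(str(k), int(v)) for k, v in entry.items() if isinstance(v, int)]
--     if not pairs:
--         return ""
--     pairs.sort(key=lambda x: x[1], reverse=True)
--     if len(pairs) > 1 and pairs[0][1] == pairs[1][1]:
--         return ""
--     return pairs[0][0]
-- ===== SOURCE B (Python) =====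
-- def _best_digit_from_learning(entry):
--     if not isinstance(entry, dict):
--         return ""
--     best = None
--     best_key = ""
--     ties = 0
--     for k, v in entry.items():
--         if isinstance(v, int):
--             v = int(v)
--             if best is None or v > best:
--                 best, best_key, ties = v, str(k), 1
--             elif v == best:
--                 ties += 1
--     if best is None or ties > 1:
--         return ""
--     return best_key
-- ===== Notes on version B (the rewrite author's own statement) =====
-- stated objective: alternative
-- what changed: Replaces A's reverse sort followed by inspecting the top two entries with a single linear pass that tracks the running maximum value, the key of its first holder, and how many entries tie for it.
import Mathlib
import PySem

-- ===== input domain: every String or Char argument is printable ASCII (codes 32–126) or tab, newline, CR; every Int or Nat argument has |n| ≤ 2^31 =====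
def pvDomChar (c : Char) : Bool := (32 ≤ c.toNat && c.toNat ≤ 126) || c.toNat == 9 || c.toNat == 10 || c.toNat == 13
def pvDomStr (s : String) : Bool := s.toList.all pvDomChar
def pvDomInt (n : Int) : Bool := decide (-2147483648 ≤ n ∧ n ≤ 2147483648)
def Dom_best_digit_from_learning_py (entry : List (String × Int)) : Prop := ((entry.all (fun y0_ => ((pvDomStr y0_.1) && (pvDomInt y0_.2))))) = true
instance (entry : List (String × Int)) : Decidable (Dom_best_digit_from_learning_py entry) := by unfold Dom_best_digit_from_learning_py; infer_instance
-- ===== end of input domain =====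

-- B replaces A's reverse sort + inspect-the-top-two by a single linear pass that tracks
-- the running maximum value, its first key, and how many entries tie for it (objective: alternative).

-- ===== PORT A =====
-- pairs = [(str(k), int(v)) for k, v in entry.items() if isinstance(v, int)]: with the typed
-- input every value IS an int, str(k)=k and int(v)=v, so the comprehension is the identity map.
def best_digit_from_learning_py (entry : List (String × Int)) : String :=
  let pairs := entry.map (fun kv => (kv.1, kv.2))
  if pairs.isEmpty then ""
  else
    let ps := PySem.List.sorted pairs (fun x => x.2) true
    match ps with
    | [] => ""                                   -- unreachable: pairs nonempty
    | [p] => p.1                                 -- len(pairs) = 1: return pairs[0][0]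
    | p :: q :: _ => if p.2 == q.2 then "" else p.1

-- ===== PORT B =====
-- loop body: state = (best value seen or none, key of its first holder, how many hold it)
def bdflStep (s : Option Int × String × Nat) (kv : String × Int) : Option Int × String × Nat :=
  match s with
  | (none, _, _) => (some kv.2, kv.1, 1)
  | (some b, k, c) =>
    if b < kv.2 then (some kv.2, kv.1, 1)
    else if kv.2 == b then (some b, k, c + 1)
    else (some b, k, c)

def best_digit_from_learning_py_alt (entry : List (String × Int)) : String :=
  match entry.foldl bdflStep (none, "", 0) with
  | (none, _, _) => ""
  | (some _, k, c) => if 1 < c then "" else k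

-- ===== PRECONDITION & SPEC =====
def Spec_best_digit_from_learning_py (entry : List (String × Int)) (out : String) : Prop := out = best_digit_from_learning_py_alt entry
instance (entry : List (String × Int)) (out : String) : Decidable (Spec_best_digit_from_learning_py entry out) := by unfold Spec_best_digit_from_learning_py; infer_instance

-- ===== CLAIM (what is proved, stated in full; the proofs are below) =====
def Claim_equal_best_digit_from_learning_py : Prop := ∀ (entry : List (String × Int)), Dom_best_digit_from_learning_py entry → Spec_best_digit_from_learning_py entry (best_digit_from_learning_py entry)

-- ===== LEMMAS AND PROOFS =====

-- closed form of B's loop once the state is inhabited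
def bdflSpec (l : List (String × Int)) (b : Int) (k : String) (c : Nat) : Option Int × String × Nat :=
  let M := l.foldl (fun a y => max a y.2) b
  (some M,
   if b = M then k else
     match l.find? (fun y => y.2 == M) with
     | some y => y.1
     | none => k,
   (if b = M then c else 0) + l.countP (fun y => y.2 == M))

lemma bdfl_max_attained (l : List (String × Int)) (a : Int) :
    l.foldl (fun acc y => max acc y.2) a = a ∨
      ∃ y ∈ l, l.foldl (fun acc y => max acc y.2) a = y.2 := by
  induction l generalizing a with
  | nil => simp
  | cons x l ih =>
    simp only [List.foldl_cons]
    rcases ih (max a x.2) with h | ⟨y, hy, hyv⟩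
    · rcases max_choice a x.2 with hc | hc
      · exact Or.inl (by rw [h, hc])
      · exact Or.inr ⟨x, List.mem_cons_self, by rw [h, hc]⟩
    · exact Or.inr ⟨y, List.mem_cons_of_mem _ hy, hyv⟩

lemma bdfl_inv (l : List (String × Int)) (b : Int) (k : String) (c : Nat) :
    l.foldl bdflStep (some b, k, c) = bdflSpec l b k c := by
  induction l generalizing b k c with
  | nil => simp [bdflSpec]
  | cons x l ih =>
    simp only [List.foldl_cons, bdflStep]
    by_cases hlt : b < x.2
    · rw [if_pos hlt, ih]
      have hmax : max b x.2 = x.2 := max_eq_right hlt.le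
      have hM : l.foldl (fun a y => max a y.2) x.2 = (x :: l).foldl (fun a y => max a y.2) b := by
        simp [hmax]
      have hle : x.2 ≤ l.foldl (fun a y => max a y.2) x.2 :=
        (PySem.List.le_foldl_max_int l (fun y => y.2) x.2).1
      simp only [bdflSpec, ← hM]
      by_cases hx : x.2 = l.foldl (fun a y => max a y.2) x.2
      · have hb : ¬ b = l.foldl (fun a y => max a y.2) x.2 := by omega
        have hxeq : (x.2 == l.foldl (fun a y => max a y.2) x.2) = true := by
          exact beq_iff_eq.mpr hx
        simp only [List.find?_cons, List.countP_cons, hxeq, if_pos hx, if_neg hb]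
        simp [← hx]
        omega
      · have hb : ¬ b = l.foldl (fun a y => max a y.2) x.2 := by omega
        have hxne : ¬ (x.2 == l.foldl (fun a y => max a y.2) x.2) = true := by
          simpa using hx
        obtain ⟨w, hw, hwM⟩ := (bdfl_max_attained l x.2).resolve_left (fun h => hx h.symm)
        have hfind : l.find? (fun y => y.2 == l.foldl (fun a y => max a y.2) x.2) |>.isSome := by
          rw [List.find?_isSome]
          exact ⟨w, hw, by simpa using hwM.symm⟩
        obtain ⟨u, hu⟩ := Option.isSome_iff_exists.mp hfind
        simp [hx, hb, hxne, hu]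
    · rw [if_neg hlt]
      have hmax : max b x.2 = b := max_eq_left (by omega)
      have hM : (x :: l).foldl (fun a y => max a y.2) b = l.foldl (fun a y => max a y.2) b := by
        simp [hmax]
      have hle : b ≤ l.foldl (fun a y => max a y.2) b :=
        (PySem.List.le_foldl_max_int l (fun y => y.2) b).1
      by_cases heq : x.2 = b
      · have : (x.2 == b) = true := by simpa using heq
        rw [this, if_pos rfl, ih]
        simp only [bdflSpec, hM, List.countP_cons, List.find?_cons]
        by_cases hb : b = l.foldl (fun a y => max a y.2) b
        · have hxm : (x.2 == l.foldl (fun a y => max a y.2) b) = true := by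
            rw [heq]; exact beq_iff_eq.mpr hb
          simp only [if_pos hb]
          simp [hxm]
          omega
        · have hxm : ¬ (x.2 == l.foldl (fun a y => max a y.2) b) = true := by
            simp [heq]; omega
          simp [hb, hxm]
      · have : ¬ (x.2 == b) = true := by simpa using heq
        rw [if_neg (by simpa using this), ih]
        simp only [bdflSpec, hM, List.countP_cons, List.find?_cons]
        have hxm : ¬ (x.2 == l.foldl (fun a y => max a y.2) b) = true := by
          simp; omega
        simp [hxm]

lemma foldl_max_le_int (l : List (String × Int)) (a c : Int) (h : a ≤ c)
    (h2 : ∀ y ∈ l, y.2 ≤ c) : l.foldl (fun acc y => max acc y.2) a ≤ c := by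
  induction l generalizing a with
  | nil => simpa
  | cons x l ih =>
    simp only [List.foldl_cons]
    exact ih _ (max_le h (h2 x (List.mem_cons_self))) (fun y hy => h2 y (List.mem_cons_of_mem _ hy))

lemma countP_one_unique {α : Type} (l : List α) (p : α → Bool)
    (h : l.countP p = 1) {y z : α} (hy : y ∈ l) (hpy : p y) (hz : z ∈ l) (hpz : p z) :
    y = z := by
  have hl : (l.filter p).length = 1 := by rw [← List.countP_eq_length_filter]; exact h
  obtain ⟨w, hw⟩ := List.length_eq_one_iff.mp hl
  have hy' : y ∈ l.filter p := List.mem_filter.mpr ⟨hy, hpy⟩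
  have hz' : z ∈ l.filter p := List.mem_filter.mpr ⟨hz, hpz⟩
  rw [hw] at hy' hz'
  simp at hy' hz'
  rw [hy', hz']

theorem main_equiv (entry : List (String × Int)) :
    best_digit_from_learning_py entry = best_digit_from_learning_py_alt entry := by
  cases entry with
  | nil => rfl
  | cons x t =>
    have hmapid : (x :: t).map (fun kv => ((kv.1 : String), (kv.2 : Int))) = x :: t := by simp
    -- B's closed form
    have hB : best_digit_from_learning_py_alt (x :: t) =
        (match bdflSpec t x.2 x.1 1 with
         | (none, _, _) => ""
         | (some _, k, c) => if 1 < c then "" else k) := by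
      unfold best_digit_from_learning_py_alt
      rw [List.foldl_cons, show bdflStep (none, "", 0) x = (some x.2, x.1, 1) from rfl, bdfl_inv]
    cases hs : PySem.List.sorted ((x :: t).map (fun kv => (kv.1, kv.2))) (fun y => y.2) true with
    | nil =>
      rw [hmapid] at hs
      exact absurd ((PySem.List.sorted_eq_nil_iff _ _ _).mp hs) (by simp)
    | cons p rest =>
      rw [hmapid] at hs
      have hpmem : p ∈ x :: t := (PySem.List.mem_sorted _ _ _ _).mp (hs ▸ List.mem_cons_self)
      have hub : ∀ y ∈ x :: t, y.2 ≤ p.2 := PySem.List.key_head_sorted_rev_ge _ _ hs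
      have hMp : t.foldl (fun a y => max a y.2) x.2 = p.2 := by
        refine le_antisymm (foldl_max_le_int t x.2 p.2 (hub x List.mem_cons_self)
          (fun y hy => hub y (List.mem_cons_of_mem _ hy))) ?_
        rcases List.mem_cons.mp hpmem with h | h
        · rw [h]; exact (PySem.List.le_foldl_max_int t (fun y => y.2) x.2).1
        · exact (PySem.List.le_foldl_max_int t (fun y => y.2) x.2).2 p h
      have hcnt : best_digit_from_learning_py_alt (x :: t) =
          (if 1 < (x :: t).countP (fun y => y.2 == p.2) then ""
           else if x.2 = p.2 then x.1 else
             match t.find? (fun y => y.2 == p.2) with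
             | some y => y.1
             | none => x.1) := by
        rw [hB]
        simp only [bdflSpec, hMp, List.countP_cons]
        by_cases hx2 : x.2 = p.2
        · have hb2 : (x.2 == p.2) = true := by simpa using hx2
          rw [if_pos hx2, if_pos hb2, Nat.add_comm]
        · have : ¬ (x.2 == p.2) = true := by simpa using hx2
          simp [hx2, this]
      have hperm : (p :: rest).Perm (x :: t) := hs ▸ PySem.List.sorted_perm (x :: t) (fun y => y.2) true
      have hcntperm : (x :: t).countP (fun y => y.2 == p.2) = (p :: rest).countP (fun y => y.2 == p.2) :=
        (hperm.countP_eq _).symm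
      cases rest with
      | nil =>
        -- singleton: t = [] and p = x
        have hA : best_digit_from_learning_py (x :: t) = p.1 := by
          unfold best_digit_from_learning_py
          rw [hmapid]
          simp only [List.isEmpty_cons, if_neg Bool.false_ne_true, hs]
        have hlen : (x :: t).length = 1 := by simpa using hperm.length_eq.symm
        have ht : t = [] := by simpa using hlen
        subst ht
        have hp : p = x := by
          have := List.perm_singleton.mp hperm.symm
          simpa using this.symm
        rw [hA, hcnt]
        subst hp
        simp
      | cons q r =>
        have hA : best_digit_from_learning_py (x :: t) =
            (if (p.2 == q.2) = true then "" else p.1) := by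
          unfold best_digit_from_learning_py
          rw [hmapid]
          simp only [List.isEmpty_cons, if_neg Bool.false_ne_true, hs]
        have hpair : (p :: q :: r).Pairwise (fun a b => b.2 ≤ a.2) := by
          have := PySem.List.sorted_pairwise_rev (x :: t) (fun y => y.2)
          rwa [hs] at this
        by_cases hq : q.2 = p.2
        · -- tie at the top: both return ""
          have h2 : 2 ≤ (x :: t).countP (fun y => y.2 == p.2) := by
            rw [hcntperm]
            simp only [List.countP_cons]
            have h2 : (q.2 == p.2) = true := by simpa using hq
            simp [h2]
          have hbeq : (p.2 == q.2) = true := by simpa using hq.symm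
          rw [hA, hcnt, if_pos hbeq, if_pos (by omega)]
        · -- unique maximum
          have hcr : ∀ z ∈ q :: r, ¬ z.2 = p.2 := by
            intro z hz hzp
            have hqz : z.2 ≤ q.2 := by
              rcases List.mem_cons.mp hz with h | h
              · rw [h]
              · exact (List.pairwise_cons.mp (List.pairwise_cons.mp hpair).2).1 z h
            have hqp : q.2 ≤ p.2 := (List.pairwise_cons.mp hpair).1 q List.mem_cons_self
            omega
          have hn : (x :: t).countP (fun y => y.2 == p.2) = 1 := by
            rw [hcntperm]
            have hzero : (q :: r).countP (fun y => y.2 == p.2) = 0 :=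
              List.countP_eq_zero.mpr (fun z hz => by simpa using hcr z hz)
            rw [List.countP_cons, hzero]
            simp
          have huniq : ∀ y ∈ x :: t, y.2 = p.2 → y = p := by
            intro y hy hyp
            exact countP_one_unique (x :: t) (fun y => y.2 == p.2) hn hy (by simpa using hyp)
              hpmem (by simp)
          have hpq : ¬ (p.2 == q.2) = true := by simpa using fun h => hq h.symm
          rw [hA, hcnt, if_neg hpq, if_neg (by omega)]
          by_cases hx2 : x.2 = p.2
          · rw [if_pos hx2, (huniq x List.mem_cons_self hx2)]
          · rw [if_neg hx2]
            have hpt : p ∈ t := by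
              rcases List.mem_cons.mp hpmem with h | h
              · exact absurd (congrArg Prod.snd h).symm hx2
              · exact h
            have hfind : (t.find? (fun y => y.2 == p.2)).isSome := by
              rw [List.find?_isSome]
              exact ⟨p, hpt, by simp⟩
            obtain ⟨u, hu⟩ := Option.isSome_iff_exists.mp hfind
            have hu1 : u ∈ t := List.mem_of_find?_eq_some hu
            have hu2 : u.2 = p.2 := by simpa using List.find?_some hu
            rw [hu]
            rw [huniq u (List.mem_cons_of_mem _ hu1) hu2]

-- ===== VERDICT (by name: the statement is the Claim_ definition above) =====
theorem best_digit_from_learning_py_spec : Claim_equal_best_digit_from_learning_py := by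
  intro entry _
  unfold Spec_best_digit_from_learning_py
  exact main_equiv entry
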